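-- pv_equiv track=rewrite | github.com/AP-MI-2021/lab-4-bilcdenisa | main.py | palindroame_obtinute_in_urma_concatenarii
-- ===== SOURCE A (Python) =====
-- def palindroame_obtinute_in_urma_concatenarii(lista1, lista2):
--     '''
--        Determina palindroamele obtinute prin concatenarea elementelor de pe acelasi pozitii in doua liste
--
--        :param lista1: prima lista initiala de int-uri
--        :param lista2: a 2-a lista initiala de int-uri
--        :return: returneaza o lista obtinuta care contine toate palindroamele obtinute prin concatenarea elementelor de pe aceleasi
--        pozitii din lista 1 si lista2
--        '''
--
--     lista_palindroame = []
--     if len(lista1)<= len(lista2):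
--         lungime = len(lista1) -1
--     else:
--         lungime = len(lista2)-1
--
--
--     index = 0
--     while lungime >= index:
--         element_1 = str(lista1[index])
--         element_2 = str(lista2[index])
--         element_concatenat = element_1+element_2
--         int_element_concatenat = int(element_concatenat)
--         #verific daca int_element_concatenat este palindrom
--         copie_element = int_element_concatenat
--         invers = 0
--         while copie_element!= 0:
--             cifra = copie_element%10
--             invers=invers*10 + cifra
--             copie_element = copie_element // 10
--         if invers == int_element_concatenat:
--             lista_palindroame.append(int_element_concatenat)
--         index = index +1
--
--     return lista_palindroame
-- ===== SOURCE B (Python) =====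
-- def palindroame_obtinute_in_urma_concatenarii(lista1, lista2):
--     concatenari = [int(str(a) + str(b)) for a, b in zip(lista1, lista2)]
--     return [n for n in concatenari if str(n) == str(n)[::-1]]
-- ===== Notes on version B (the rewrite author's own statement) =====
-- stated objective: simpler
-- what changed: Replaced the index-driven while loop and the arithmetic digit-reversal palindrome test by a zip-based map building the concatenated ints and a filter using the string test str(n) == str(n)[::-1].
-- outside the precondition, e.g. on palindroame_obtinute_in_urma_concatenarii([3], [-4]): A raises ValueError, B raises ValueError; on palindroame_obtinute_in_urma_concatenarii([-3], [4]): A does not finish within the time limit, B returns []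
import Mathlib
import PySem

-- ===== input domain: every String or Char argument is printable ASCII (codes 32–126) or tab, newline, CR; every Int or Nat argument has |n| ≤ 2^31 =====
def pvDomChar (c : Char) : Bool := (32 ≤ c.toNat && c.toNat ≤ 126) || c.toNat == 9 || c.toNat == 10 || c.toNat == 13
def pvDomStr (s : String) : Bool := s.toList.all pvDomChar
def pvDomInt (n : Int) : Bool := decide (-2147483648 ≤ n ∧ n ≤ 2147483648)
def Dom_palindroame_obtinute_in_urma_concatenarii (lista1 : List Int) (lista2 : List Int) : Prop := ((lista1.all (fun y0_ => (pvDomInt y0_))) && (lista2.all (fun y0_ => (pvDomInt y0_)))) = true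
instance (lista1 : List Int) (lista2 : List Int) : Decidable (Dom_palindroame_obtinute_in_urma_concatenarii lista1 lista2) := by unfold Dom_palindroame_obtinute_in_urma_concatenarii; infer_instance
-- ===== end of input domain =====

-- B replaces A's index-driven while loop and arithmetic digit-reversal palindrome test by a
-- zip-map pass building the concatenated ints and a filter using the string test str(n) == str(n)[::-1]
-- (objective: simpler/idiomatic; not claimed faster).

-- ===== PORT A =====
-- `int(str(a) + str(b))`, the expression both Pythons contain verbatim; `.getD 0` is unreachable
-- under Pre_ (for a, b ≥ 0 the string is all digits, so int() does not raise).
def pvConcatInt (a b : Int) : Int :=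
  (PySem.Int.ofChars? (PySem.Int.toChars a ++ PySem.Int.toChars b)).getD 0

-- A's inner `while copie_element != 0` digit-reversal loop, with fuel; fuel `n.natAbs + 1`
-- is enough for every nonnegative value (the only ones Pre_ admits: on a negative value the
-- Python loop never terminates, so no input admitted by Pre_ reaches exhausted fuel).
def pvRevLoop : Nat → Int → Int → Int
  | 0, _, invers => invers
  | f+1, copie, invers =>
    if copie = 0 then invers
    else pvRevLoop f (PySem.Int.floordiv copie 10) (invers * 10 + PySem.Int.mod copie 10)

-- A's outer `while lungime >= index` loop.
def pvLoopA (lista1 lista2 : List Int) (lungime : Int) (index : Int) (acc : List Int) : List Int :=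
  if lungime ≥ index then
    let n := pvConcatInt ((PySem.List.pyGet? lista1 index).getD 0) ((PySem.List.pyGet? lista2 index).getD 0)
    let invers := pvRevLoop (n.natAbs + 1) n 0
    pvLoopA lista1 lista2 lungime (index + 1) (if invers = n then acc ++ [n] else acc)
  else acc
  termination_by (lungime + 1 - index).toNat
  decreasing_by omega

def palindroame_obtinute_in_urma_concatenarii (lista1 : List Int) (lista2 : List Int) : List Int :=
  let lungime : Int :=
    if (lista1.length : Int) ≤ (lista2.length : Int) then (lista1.length : Int) - 1
    else (lista2.length : Int) - 1
  pvLoopA lista1 lista2 lungime 0 []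

-- ===== PORT B =====
-- `str(n) == str(n)[::-1]`
def pvIsPalStr (n : Int) : Bool :=
  PySem.Int.toChars n == (PySem.List.slice? (PySem.Int.toChars n) none none (-1)).getD []

def palindroame_obtinute_in_urma_concatenarii_alt (lista1 : List Int) (lista2 : List Int) : List Int :=
  let concatenari := (lista1.zip lista2).map (fun p => pvConcatInt p.1 p.2)
  concatenari.filter (fun n => pvIsPalStr n)

-- ===== PRECONDITION & SPEC =====
-- Pre_ admits exactly the inputs on which the Python A returns: if some pair in the common
-- prefix contains a negative number, A either raises ValueError (int('…-…') when lista2's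
-- element is negative) or loops forever (its digit-reversal never reaches 0 on a negative int).
def Pre_palindroame_obtinute_in_urma_concatenarii (lista1 : List Int) (lista2 : List Int) : Prop :=
  ∀ p ∈ lista1.zip lista2, 0 ≤ p.1 ∧ 0 ≤ p.2
instance (lista1 : List Int) (lista2 : List Int) : Decidable (Pre_palindroame_obtinute_in_urma_concatenarii lista1 lista2) := by unfold Pre_palindroame_obtinute_in_urma_concatenarii; infer_instance

def pvWitness_palindroame_obtinute_in_urma_concatenarii : List Int × List Int := ([1, 22], [1, 3])

def Spec_palindroame_obtinute_in_urma_concatenarii (lista1 : List Int) (lista2 : List Int) (out : List Int) : Prop := out = palindroame_obtinute_in_urma_concatenarii_alt lista1 lista2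
instance (lista1 : List Int) (lista2 : List Int) (out : List Int) : Decidable (Spec_palindroame_obtinute_in_urma_concatenarii lista1 lista2 out) := by unfold Spec_palindroame_obtinute_in_urma_concatenarii; infer_instance

-- ===== CLAIM (what is proved, stated in full; the proofs are below) =====
def Claim_equal_palindroame_obtinute_in_urma_concatenarii : Prop := ∀ (lista1 : List Int) (lista2 : List Int), Dom_palindroame_obtinute_in_urma_concatenarii lista1 lista2 → Pre_palindroame_obtinute_in_urma_concatenarii lista1 lista2 → Spec_palindroame_obtinute_in_urma_concatenarii lista1 lista2 (palindroame_obtinute_in_urma_concatenarii lista1 lista2)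

-- ===== LEMMAS AND PROOFS =====

-- `Nat.toDigits` (what `str` prints for a nonnegative int) in terms of `Nat.digits`.
lemma pv_toDigitsCore_eq (f : Nat) : ∀ n ds, 0 < n → n < f →
    Nat.toDigitsCore 10 f n ds = ((Nat.digits 10 n).map Nat.digitChar).reverse ++ ds := by
  induction f with
  | zero => intro n ds h h2; omega
  | succ f ih =>
    intro n ds h h2
    rw [Nat.toDigitsCore]
    rw [Nat.digits_def' (by norm_num : 1 < 10) h]
    by_cases h0 : n / 10 = 0
    · simp [h0]
    · rw [if_neg h0, ih (n/10) _ (Nat.pos_of_ne_zero h0) (by have := Nat.div_lt_self h (by norm_num : 1 < 10); omega)]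
      simp

lemma pv_toDigits_eq (n : Nat) (h : 0 < n) :
    Nat.toDigits 10 n = ((Nat.digits 10 n).map Nat.digitChar).reverse := by
  rw [Nat.toDigits, pv_toDigitsCore_eq (n+1) n [] h (by omega)]; simp

-- A's digit-reversal loop is a fold over the little-endian digits.
lemma pv_revLoop_eq (f : Nat) : ∀ (m : Nat) (i : Int), m < f →
    pvRevLoop f (m : Int) i = List.foldl (fun (acc : Int) (d : Nat) => acc * 10 + (d : Int)) i (Nat.digits 10 m) := by
  induction f with
  | zero => omega
  | succ f ih =>
    intro m i hm
    by_cases h : m = 0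
    · simp [h, pvRevLoop]
    · rw [pvRevLoop]
      rw [if_neg (by exact_mod_cast h)]
      rw [(by exact_mod_cast PySem.Int.floordiv_natCast m 10 : PySem.Int.floordiv (m:Int) 10 = ((m/10 : Nat) : Int)),
          (by exact_mod_cast PySem.Int.mod_natCast m 10 : PySem.Int.mod (m:Int) 10 = ((m%10 : Nat) : Int))]
      rw [ih (m/10) _ (by have := Nat.div_lt_self (Nat.pos_of_ne_zero h) (by norm_num : 1 < 10); omega)]
      rw [Nat.digits_def' (by norm_num : 1 < 10) (Nat.pos_of_ne_zero h)]
      simp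

lemma pv_foldl_eq_ofDigits : ∀ (ds : List Nat) (i : Int),
    List.foldl (fun (acc : Int) (d : Nat) => acc * 10 + (d : Int)) i ds = i * 10 ^ ds.length + ((Nat.ofDigits 10 ds.reverse : Nat) : Int) := by
  intro ds
  induction ds with
  | nil => simp [Nat.ofDigits_nil]
  | cons d t ih =>
    intro i
    simp only [List.foldl_cons, List.reverse_cons]
    rw [ih]
    push_cast [Nat.ofDigits_append, Nat.ofDigits_singleton]
    simp only [List.length_cons, List.length_reverse]
    ring

-- base-10 representations of equal length and equal value coincide
lemma pv_ofDigits_inj : ∀ (L1 L2 : List Nat), L1.length = L2.length →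
    (∀ d ∈ L1, d < 10) → (∀ d ∈ L2, d < 10) →
    Nat.ofDigits 10 L1 = Nat.ofDigits 10 L2 → L1 = L2 := by
  intro L1
  induction L1 with
  | nil => intro L2 h _ _ _; simpa using (List.length_eq_zero_iff.mp h.symm)
  | cons d t ih =>
    intro L2 hlen h1 h2 hv
    cases L2 with
    | nil => simp at hlen
    | cons d2 t2 =>
      simp only [Nat.ofDigits_cons] at hv
      have hd : d < 10 := h1 d (by simp)
      have hd2 : d2 < 10 := h2 d2 (by simp)
      have hv' : (d : ℕ) + 10 * Nat.ofDigits 10 t = d2 + 10 * Nat.ofDigits 10 t2 := by exact_mod_cast hv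
      have : d = d2 ∧ Nat.ofDigits 10 t = Nat.ofDigits 10 t2 := by omega
      obtain ⟨e1, e2⟩ := this
      have := ih t2 (by simpa using hlen) (fun x hx => h1 x (by simp [hx])) (fun x hx => h2 x (by simp [hx])) e2
      simp [e1, this]

lemma pv_digitChar_inj {d1 d2 : Nat} (h1 : d1 < 10) (h2 : d2 < 10) (h : Nat.digitChar d1 = Nat.digitChar d2) : d1 = d2 := by
  interval_cases d1 <;> interval_cases d2 <;> simp_all [Nat.digitChar]

lemma pv_map_digitChar_inj : ∀ (L1 L2 : List Nat), (∀ d ∈ L1, d < 10) → (∀ d ∈ L2, d < 10) →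
    L1.map Nat.digitChar = L2.map Nat.digitChar → L1 = L2 := by
  intro L1
  induction L1 with
  | nil => intro L2 _ _ h; cases L2 <;> simp_all
  | cons d t ih =>
    intro L2 h1 h2 h
    cases L2 with
    | nil => simp at h
    | cons d2 t2 =>
      simp only [List.map_cons, List.cons.injEq] at h
      have e1 := pv_digitChar_inj (h1 d (by simp)) (h2 d2 (by simp)) h.1
      have e2 := ih t2 (fun x hx => h1 x (by simp [hx])) (fun x hx => h2 x (by simp [hx])) h.2
      simp [e1, e2]

-- int() of a string without '-' never returns a negative value
lemma pv_ofChars?_nonneg (cs : List Char) (h : '-' ∉ cs) (v : Int)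
    (hv : PySem.Int.ofChars? cs = some v) : 0 ≤ v := by
  unfold PySem.Int.ofChars? at hv
  simp only [letFun] at hv  -- beta-reduce the `have` wrapper so `split` can reach the match
  have hmem : ∀ c ∈ (List.dropWhile PySem.Int.isIntSpace (List.dropWhile PySem.Int.isIntSpace cs).reverse).reverse, c ∈ cs := by
    intro c hc
    have h1 := List.Sublist.mem (List.mem_reverse.mp hc) (List.dropWhile_sublist _)
    exact List.Sublist.mem (List.mem_reverse.mp h1) (List.dropWhile_sublist _)
  generalize ht : (List.dropWhile PySem.Int.isIntSpace (List.dropWhile PySem.Int.isIntSpace cs).reverse).reverse = t at hv hmem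
  rcases t with _ | ⟨c, ds⟩
  · simp only [Option.map_eq_some_iff] at hv
    obtain ⟨x, hx, rfl⟩ := hv
    obtain ⟨a, -, hx⟩ := Option.bind_eq_some_iff.mp hx
    simp only [pure, Option.some.injEq] at hx
    subst hx
    positivity
  · have hc : c ≠ '-' := fun e => h (e ▸ hmem c (by simp))
    split at hv
    · rename_i ds' heq
      cases heq
      exact absurd rfl hc
    all_goals
      simp only [Option.map_eq_some_iff] at hv
      obtain ⟨x, hx, rfl⟩ := hv
      obtain ⟨a, -, hx⟩ := Option.bind_eq_some_iff.mp hx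
      simp only [pure, Option.some.injEq] at hx
      subst hx
      positivity

lemma pv_neg_not_mem_toDigits (m : Nat) : '-' ∉ Nat.toDigits 10 m := by
  by_cases h : m = 0
  · subst h; decide
  · rw [pv_toDigits_eq m (Nat.pos_of_ne_zero h)]
    simp only [List.mem_reverse, List.mem_map]
    rintro ⟨d, hd, hdc⟩
    have : d < 10 := Nat.digits_lt_base (by norm_num) hd
    interval_cases d <;> simp [Nat.digitChar] at hdc

lemma pv_toChars_nonneg (a : Int) (ha : 0 ≤ a) :
    PySem.Int.toChars a = Nat.toDigits 10 a.toNat := by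
  simp [PySem.Int.toChars, not_lt.mpr ha]

lemma pv_concat_nonneg (a b : Int) (ha : 0 ≤ a) (hb : 0 ≤ b) : 0 ≤ pvConcatInt a b := by
  unfold pvConcatInt
  cases hv : PySem.Int.ofChars? (PySem.Int.toChars a ++ PySem.Int.toChars b) with
  | none => simp
  | some v =>
    simp only [Option.getD_some]
    refine pv_ofChars?_nonneg _ ?_ v hv
    rw [pv_toChars_nonneg a ha, pv_toChars_nonneg b hb]
    simp only [List.mem_append]
    rintro (hm | hm)
    · exact pv_neg_not_mem_toDigits _ hm
    · exact pv_neg_not_mem_toDigits _ hm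

-- the two palindrome tests agree on every nonnegative value
lemma pv_test_iff (n : Int) (hn : 0 ≤ n) :
    (pvRevLoop (n.natAbs + 1) n 0 = n) ↔ (pvIsPalStr n = true) := by
  obtain ⟨m, rfl⟩ : ∃ m : Nat, n = (m : Int) := ⟨n.toNat, (Int.toNat_of_nonneg hn).symm⟩
  have hchars : PySem.Int.toChars (m : Int) = Nat.toDigits 10 m := by
    simpa using pv_toChars_nonneg (m : Int) (by positivity)
  unfold pvIsPalStr
  rw [PySem.List.slice?_none_none_neg_one, Option.getD_some, hchars]
  simp only [Int.natAbs_natCast, beq_iff_eq]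
  by_cases h : m = 0
  · subst h; decide
  · have hm : 0 < m := Nat.pos_of_ne_zero h
    have hlt : ∀ d ∈ Nat.digits 10 m, d < 10 := fun d hd => Nat.digits_lt_base (by norm_num) hd
    rw [pv_revLoop_eq (m + 1) m 0 (by omega), pv_foldl_eq_ofDigits, pv_toDigits_eq m hm]
    simp only [zero_mul, zero_add, List.reverse_reverse]
    constructor
    · intro hrev
      have hval : Nat.ofDigits 10 (Nat.digits 10 m).reverse = m := by exact_mod_cast hrev
      have hpal : (Nat.digits 10 m).reverse = Nat.digits 10 m :=
        pv_ofDigits_inj _ _ (by simp) (fun d hd => hlt d (List.mem_reverse.mp hd)) hlt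
          (by rw [hval, Nat.ofDigits_digits])
      rw [← List.map_reverse, hpal]
    · intro hstr
      have h1 : List.map Nat.digitChar (Nat.digits 10 m).reverse = List.map Nat.digitChar (Nat.digits 10 m) := by
        rw [List.map_reverse]; exact hstr
      have hpal := pv_map_digitChar_inj _ _ (fun d hd => hlt d (List.mem_reverse.mp hd)) hlt h1
      rw [hpal, Nat.ofDigits_digits]

-- A's `lungime` is one less than the length of zip(lista1, lista2)
lemma pv_lungime_eq (lista1 lista2 : List Int) :
    (if (lista1.length : Int) ≤ (lista2.length : Int) then (lista1.length : Int) - 1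
     else (lista2.length : Int) - 1) = ((lista1.zip lista2).length : Int) - 1 := by
  rw [List.length_zip]
  split_ifs with h <;> push_cast <;> omega

-- A's while loop from index k produces B's map-filter of the zip suffix from k
lemma pv_loopA_eq (lista1 lista2 : List Int)
    (hpre : ∀ p ∈ lista1.zip lista2, 0 ≤ p.1 ∧ 0 ≤ p.2) :
    ∀ (d k : Nat) (acc : List Int), (lista1.zip lista2).length = k + d →
    pvLoopA lista1 lista2 (((lista1.zip lista2).length : Int) - 1) (k : Int) acc =
      acc ++ (((lista1.zip lista2).drop k).map (fun p => pvConcatInt p.1 p.2)).filter (fun n => pvIsPalStr n) := by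
  intro d
  induction d with
  | zero =>
    intro k acc hlen
    rw [pvLoopA, if_neg (by omega), show k = (lista1.zip lista2).length by omega, List.drop_length]
    simp
  | succ d ih =>
    intro k acc hlen
    have hk : k < (lista1.zip lista2).length := by omega
    have hk1 : k < lista1.length := by rw [List.length_zip] at hk; omega
    have hk2 : k < lista2.length := by rw [List.length_zip] at hk; omega
    rw [pvLoopA, if_pos (by omega)]
    have hget1 : (PySem.List.pyGet? lista1 (k : Int)).getD 0 = lista1[k] := by
      simp [PySem.List.pyGet?_natCast, List.getElem?_eq_getElem hk1]
    have hget2 : (PySem.List.pyGet? lista2 (k : Int)).getD 0 = lista2[k] := by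
      simp [PySem.List.pyGet?_natCast, List.getElem?_eq_getElem hk2]
    rw [hget1, hget2]
    have hdrop : (lista1.zip lista2).drop k = (lista1[k], lista2[k]) :: (lista1.zip lista2).drop (k + 1) := by
      rw [List.drop_eq_getElem_cons hk]
      simp
    have hnn : 0 ≤ pvConcatInt lista1[k] lista2[k] := by
      have hp := hpre (lista1[k], lista2[k]) (by rw [← List.getElem_zip (h := hk)]; exact List.getElem_mem hk)
      exact pv_concat_nonneg _ _ hp.1 hp.2
    have hcast : (k : Int) + 1 = ((k + 1 : Nat) : Int) := by push_cast; ring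
    rw [hcast, ih (k + 1) _ (by omega)]
    rw [hdrop]
    simp only [List.map_cons, List.filter_cons]
    by_cases ht : pvIsPalStr (pvConcatInt lista1[k] lista2[k]) = true
    · rw [if_pos ((pv_test_iff _ hnn).mpr ht), ht]
      simp
    · rw [if_neg (fun hc => ht ((pv_test_iff _ hnn).mp hc))]
      simp [eq_false_of_ne_true ht]

-- ===== VERDICT (by name: the statement is the Claim_ definition above) =====
theorem palindroame_obtinute_in_urma_concatenarii_spec : Claim_equal_palindroame_obtinute_in_urma_concatenarii := by
  intro lista1 lista2 _ hpre
  unfold Spec_palindroame_obtinute_in_urma_concatenarii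
  unfold palindroame_obtinute_in_urma_concatenarii palindroame_obtinute_in_urma_concatenarii_alt
  simp only [pv_lungime_eq]
  have := pv_loopA_eq lista1 lista2 hpre (lista1.zip lista2).length 0 [] (by omega)
  simpa using this
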